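-- pv_equiv track=rewrite | github.com/dquangv/LeetCode | 2618-maximize-the-minimum-powered-city/maximize-the-minimum-powered-city.py | maxPower
-- ===== SOURCE A (Python) =====
-- from typing import List
--
-- def maxPower(stations: List[int], r: int, k: int) -> int:
--     n = len(stations)
--     left, right = 0, k + sum(stations)
--     while left <= right:
--         x = (left + right) // 2
--         use = 0
--         v = stations.copy()
--         s = sum(stations[0:r])
--         for i in range(n):
--             t = n - 1 if n - 1 < i + r else i + r
--             if i + r < n:
--                 s += v[i + r]
--             if i - r > 0:
--                 s -= v[i - r - 1]
--             diff = x - s if x - s > 0 else 0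
--             v[t] += diff
--             s += diff
--             use += diff
--         if use <= k:
--             left = x + 1
--         else:
--             right = x - 1
--     return right
-- ===== SOURCE B (Python) =====
-- def maxPower(stations, r, k):
--     n = len(stations)
--     pre = [0]
--     for v in stations:
--         pre.append(pre[-1] + v)
--     # base window power of each city: x-independent, computed once
--     bases = [pre[min(n, i + r + 1)] - pre[max(0, i - r)] for i in range(n)]
--     w = 2 * r + 1
--
--     def needed(x):
--         # D[i] = total extra power added through city i; running-max DP,
--         # no simulation or placement: D[i] = max(D[i-1], x - bases[i] + D[i-w])
--         D = []
--         prev = 0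
--         for i in range(n):
--             back = D[i - w] if i - w >= 0 else 0
--             v = x - bases[i] + back
--             if v > prev:
--                 prev = v
--             D.append(prev)
--         return prev
--
--     lo, hi = 0, k + pre[n]
--     while lo <= hi:
--         x = (lo + hi) // 2
--         if needed(x) <= k:
--             lo = x + 1
--         else:
--             hi = x - 1
--     return hi
-- ===== Notes on version B (the rewrite author's own statement) =====
-- stated objective: alternative
-- what changed: A's feasibility check simulates the greedy placement, mutating a copy of stations and sliding a window sum recomputed for every binary-search candidate x; B never places anything: it computes the prefix sums and each city's base window power once, and per candidate x runs a running-max DP on the cumulative extra power D[i] = max(D[i-1], x - bases[i] + D[i-2r-1]).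
-- outside the precondition, e.g. on maxPower([5, 3], -1, 4): A returns 6, B raises IndexError; on maxPower([5, 3], -2, -100): A returns -92, B raises IndexError
import Mathlib
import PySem

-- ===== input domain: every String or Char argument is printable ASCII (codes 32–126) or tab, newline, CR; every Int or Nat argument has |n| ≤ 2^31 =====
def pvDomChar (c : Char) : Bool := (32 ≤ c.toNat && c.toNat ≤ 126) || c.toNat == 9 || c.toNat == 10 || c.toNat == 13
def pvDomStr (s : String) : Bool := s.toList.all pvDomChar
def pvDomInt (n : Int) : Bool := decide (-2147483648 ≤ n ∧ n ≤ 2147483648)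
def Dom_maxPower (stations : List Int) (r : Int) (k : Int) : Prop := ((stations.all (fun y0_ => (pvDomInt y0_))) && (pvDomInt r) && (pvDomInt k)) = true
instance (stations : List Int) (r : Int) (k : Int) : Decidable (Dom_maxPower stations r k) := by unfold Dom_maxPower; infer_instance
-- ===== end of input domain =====

-- B replaces A's feasibility check (greedy simulation mutating a copy of stations with a
-- sliding-window sum) by a prefix-sum/base array computed once plus a running-max DP on the
-- cumulative added power D[i] = max(D[i-1], x - bases[i] + D[i-2r-1]); same binary search.


-- termination facts for the two while-loop ports (cited by name in decreasing_by)
lemma pvMidDecL (lo hi : Int) (h : lo ≤ hi) :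
    (hi + 1 - (PySem.Int.floordiv (lo + hi) 2 + 1)).toNat < (hi + 1 - lo).toNat := by
  have hb := PySem.Int.floordiv_two_mid_bounds h
  rw [Int.toNat_lt_toNat (by omega)]
  omega

lemma pvMidDecR (lo hi : Int) (h : lo ≤ hi) :
    (PySem.Int.floordiv (lo + hi) 2 - 1 + 1 - lo).toNat < (hi + 1 - lo).toNat := by
  have hb := PySem.Int.floordiv_two_mid_bounds h
  rw [Int.toNat_lt_toNat (by omega)]
  omega

-- ===== PORT A =====
-- one iteration of A's inner 'for i in range(n)' loop; state = (v, s, use)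
def pvAstep (x n r : Int) (st : List Int × Int × Int) (i : Int) : List Int × Int × Int :=
  match st with
  | (v, s, use) =>
    let t : Int := if n - 1 < i + r then n - 1 else i + r
    let s1 : Int := if i + r < n then s + PySem.List.pyGetD v (i + r) 0 else s
    let s2 : Int := if 0 < i - r then s1 - PySem.List.pyGetD v (i - r - 1) 0 else s1
    let diff : Int := if 0 < x - s2 then x - s2 else 0
    (PySem.List.pySetD v t (PySem.List.pyGetD v t 0 + diff), s2 + diff, use + diff)

-- A's value of 'use' after the inner loop, for a candidate x
def pvAuse (stations : List Int) (r x : Int) : Int :=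
  ((PySem.List.pyRange 0 (stations.length : Int) 1).foldl (pvAstep x (stations.length : Int) r)
    (stations, (PySem.List.slice stations (some 0) (some r)).sum, 0)).2.2

-- A's 'while left <= right' binary search
def pvAloop (stations : List Int) (r k : Int) (left right : Int) : Int :=
  if h : left ≤ right then
    let x := PySem.Int.floordiv (left + right) 2
    if pvAuse stations r x ≤ k then pvAloop stations r k (x + 1) right
    else pvAloop stations r k left (x - 1)
  else right
termination_by (right + 1 - left).toNat
decreasing_by
  · exact pvMidDecL left right h
  · exact pvMidDecR left right h

def maxPower (stations : List Int) (r : Int) (k : Int) : Int :=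
  pvAloop stations r k 0 (k + stations.sum)

-- ===== PORT B =====
-- pre = [0]; for v in stations: pre.append(pre[-1] + v)
def pvPrefix (stations : List Int) : List Int :=
  stations.foldl (fun pre v => pre ++ [PySem.List.pyGetD pre (-1) 0 + v]) [0]

-- bases = [pre[min(n, i+r+1)] - pre[max(0, i-r)] for i in range(n)]
def pvBases (n r : Int) (pre : List Int) : List Int :=
  (PySem.List.pyRange 0 n 1).map
    (fun i => PySem.List.pyGetD pre (min n (i + r + 1)) 0 - PySem.List.pyGetD pre (max 0 (i - r)) 0)

-- one iteration of B's DP loop; state = (D, prev)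
def pvBstep (x w : Int) (bases : List Int) (st : List Int × Int) (i : Int) : List Int × Int :=
  match st with
  | (D, prev) =>
    let back : Int := if 0 ≤ i - w then PySem.List.pyGetD D (i - w) 0 else 0
    let v : Int := x - PySem.List.pyGetD bases i 0 + back
    let prev' : Int := if prev < v then v else prev
    (D ++ [prev'], prev')

-- B's needed(x): the running maximum prev after the loop
def pvBneeded (n w : Int) (bases : List Int) (x : Int) : Int :=
  ((PySem.List.pyRange 0 n 1).foldl (pvBstep x w bases) ([], 0)).2

-- B's 'while lo <= hi' binary search
def pvBloop (n w : Int) (bases : List Int) (k : Int) (lo hi : Int) : Int :=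
  if h : lo ≤ hi then
    let x := PySem.Int.floordiv (lo + hi) 2
    if pvBneeded n w bases x ≤ k then pvBloop n w bases k (x + 1) hi
    else pvBloop n w bases k lo (x - 1)
  else hi
termination_by (hi + 1 - lo).toNat
decreasing_by
  · exact pvMidDecL lo hi h
  · exact pvMidDecR lo hi h

def maxPower_alt (stations : List Int) (r : Int) (k : Int) : Int :=
  pvBloop (stations.length : Int) (2 * r + 1)
    (pvBases (stations.length : Int) r (pvPrefix stations)) k 0
    (k + PySem.List.pyGetD (pvPrefix stations) (stations.length : Int) 0)

-- ===== PRECONDITION & SPEC =====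
-- Pre_ excludes negative r on nonempty stations except the one corner where both programs
-- still return (r = -1 with k + sum < 0, an empty binary search): elsewhere A raises
-- IndexError (r ≤ -2 once the loop runs) or silently reads and writes through Python's
-- negative-index wraparound (r = -1), an artefact of A's indexing, and B raises IndexError
-- building its base array; a station radius is naturally nonnegative.
def Pre_maxPower (stations : List Int) (r : Int) (k : Int) : Prop :=
  0 ≤ r ∨ stations = [] ∨ (r = -1 ∧ k + stations.sum < 0)
instance (stations : List Int) (r : Int) (k : Int) : Decidable (Pre_maxPower stations r k) := by unfold Pre_maxPower; infer_instance

def pvWitness_maxPower : List Int × Int × Int := ([1, 2, 0, 3], 1, 2)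

def Spec_maxPower (stations : List Int) (r : Int) (k : Int) (out : Int) : Prop := out = maxPower_alt stations r k
instance (stations : List Int) (r : Int) (k : Int) (out : Int) : Decidable (Spec_maxPower stations r k out) := by unfold Spec_maxPower; infer_instance

-- ===== CLAIM (what is proved, stated in full; the proofs are below) =====
def Claim_equal_maxPower : Prop := ∀ (stations : List Int) (r : Int) (k : Int), Dom_maxPower stations r k → Pre_maxPower stations r k → Spec_maxPower stations r k (maxPower stations r k)

-- ===== LEMMAS AND PROOFS =====

def pvPrefixList (stations : List Int) : List Int :=
  (List.range (stations.length + 1)).map (fun j => (stations.take j).sum)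

lemma pvPrefixList_ne_nil (l : List Int) : pvPrefixList l ≠ [] := by
  simp [pvPrefixList, List.range_succ]

lemma pvPrefixList_snoc (pref : List Int) (v : Int) :
    pvPrefixList pref ++ [PySem.List.pyGetD (pvPrefixList pref) (-1) 0 + v]
      = pvPrefixList (pref ++ [v]) := by
  rw [PySem.List.pyGetD_neg_one _ 0 (pvPrefixList_ne_nil pref)]
  have hlast : (pvPrefixList pref).getLast (pvPrefixList_ne_nil pref) = pref.sum := by
    rw [List.getLast_eq_getElem]
    simp [pvPrefixList]
  rw [hlast]
  conv_rhs => rw [pvPrefixList, show (pref ++ [v]).length = pref.length + 1 by simp,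
    List.range_succ, List.map_append]
  congr 1
  · rw [pvPrefixList]
    apply List.map_congr_left
    intro j hj
    rw [List.mem_range] at hj
    rw [List.take_append_of_le_length (by omega)]
  · simp

def pvP (stations : List Int) (m : Int) : Int := (stations.take m.toNat).sum

lemma pvPrefix_go (l pref : List Int) :
    l.foldl (fun pre v => pre ++ [PySem.List.pyGetD pre (-1) 0 + v]) (pvPrefixList pref)
      = pvPrefixList (pref ++ l) := by
  induction l generalizing pref with
  | nil => simp
  | cons v t ih =>
    rw [List.foldl_cons, pvPrefixList_snoc, ih]; simp

lemma pvPrefix_eq (stations : List Int) : pvPrefix stations = pvPrefixList stations := by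
  have h0 : ([0] : List Int) = pvPrefixList [] := by decide
  rw [pvPrefix, h0, pvPrefix_go]
  simp

lemma pvPrefix_getD (stations : List Int) (m : Int) (h0 : 0 ≤ m) (hn : m ≤ (stations.length : Int)) :
    PySem.List.pyGetD (pvPrefix stations) m 0 = pvP stations m := by
  rw [pvPrefix_eq]
  have hlen : (pvPrefixList stations).length = stations.length + 1 := by
    simp [pvPrefixList]
  rw [PySem.List.pyGetD_eq_getElem _ _ h0 (by rw [hlen]; push_cast; omega)]
  simp only [pvPrefixList, List.getElem_map, List.getElem_range]
  rfl

-- D[j] read with B's guard: the value at a nonnegative index, 0 otherwise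
def pvDg (Dl : List Int) (j : Int) : Int :=
  if 0 ≤ j then PySem.List.pyGetD Dl j 0 else 0

lemma pyGetD_nonneg_getD (xs : List Int) (j : Int) (h : 0 ≤ j) :
    PySem.List.pyGetD xs j 0 = xs.getD j.toNat 0 := by
  rw [show j = ((j.toNat : Nat) : Int) by omega, PySem.List.pyGetD_natCast,
    List.getD_eq_getElem?_getD, List.getD_eq_getElem?_getD,
    show ((j.toNat : Nat) : Int).toNat = j.toNat by omega]

lemma pvDg_neg (Dl : List Int) (j : Int) (h : j < 0) : pvDg Dl j = 0 := by
  unfold pvDg; rw [if_neg (by omega)]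

lemma pvDg_nil (j : Int) : pvDg [] j = 0 := by
  unfold pvDg
  split_ifs with h
  · rw [pyGetD_nonneg_getD _ _ h]; rfl
  · rfl

lemma pvDg_append (Dl : List Int) (a : Int) (j : Int) :
    pvDg (Dl ++ [a]) j = if j = (Dl.length : Int) then a else pvDg Dl j := by
  unfold pvDg
  by_cases h0 : 0 ≤ j
  · rw [if_pos h0, pyGetD_nonneg_getD _ _ h0]
    by_cases he : j = (Dl.length : Int)
    · subst he
      rw [if_pos rfl, show ((Dl.length : Int)).toNat = Dl.length by omega,
        List.getD_eq_getElem?_getD, List.getElem?_append_right le_rfl]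
      simp
    · rw [if_neg he, if_pos h0, pyGetD_nonneg_getD _ _ h0,
        List.getD_eq_getElem?_getD, List.getD_eq_getElem?_getD]
      by_cases hlt : j.toNat < Dl.length
      · rw [List.getElem?_append_left hlt]
      · rw [List.getElem?_eq_none (l := Dl) (by omega),
          List.getElem?_eq_none (by simp; omega)]
  · rw [if_neg h0, if_neg (by omega), if_neg h0]

-- the invariant tying A's simulation state after i steps to B's DP state (D, prev)
def pvInvD (l : List Int) (r : Int) (i : Nat) (sA : List Int × Int × Int) (sB : List Int × Int) : Prop :=
  sA.1.length = l.length ∧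
  sB.1.length = i ∧
  sB.2 = pvDg sB.1 ((i : Int) - 1) ∧
  sA.2.2 = sB.2 ∧
  sA.2.1 = pvP l ((i : Int) + r) - pvP l ((i : Int) - r - 1)
      + pvDg sB.1 ((i : Int) - 1) - pvDg sB.1 ((i : Int) - 2 * r - 2) ∧
  (∀ j : Nat, j < l.length → (i : Int) + r ≤ (j : Int) →
    PySem.List.pyGetD sA.1 (j : Int) 0 = PySem.List.pyGetD l (j : Int) 0) ∧
  (∀ j : Nat, j < l.length → (j : Int) < (i : Int) + r → (j : Int) ≤ (l.length : Int) - r - 2 →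
    PySem.List.pyGetD sA.1 (j : Int) 0
      = PySem.List.pyGetD l (j : Int) 0 + pvDg sB.1 ((j : Int) - r) - pvDg sB.1 ((j : Int) - r - 1))

-- small arithmetic facts about the clamped prefix sum pvP

lemma pvP_nonpos (l : List Int) (a : Int) (h : a ≤ 0) : pvP l a = 0 := by
  unfold pvP
  rw [Int.toNat_of_nonpos h]
  simp

lemma pvP_ge (l : List Int) (a : Int) (h : (l.length : Int) ≤ a) : pvP l a = l.sum := by
  unfold pvP
  rw [List.take_of_length_le (by omega)]

lemma pvP_succ (l : List Int) (a : Int) (h0 : 0 ≤ a) (h1 : a < (l.length : Int)) :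
    pvP l (a + 1) = pvP l a + PySem.List.pyGetD l a 0 := by
  rw [PySem.List.pyGetD_eq_getElem _ _ h0 h1]
  unfold pvP
  rw [show (a + 1).toNat = a.toNat + 1 by omega, List.take_add_one,
    List.getElem?_eq_getElem (by omega : a.toNat < l.length), List.sum_append]
  simp

lemma pvP_min (l : List Int) (m : Int) : pvP l (min (l.length : Int) m) = pvP l m := by
  rcases le_total m (l.length : Int) with h | h
  · rw [min_eq_right h]
  · rw [min_eq_left h, pvP_ge l m h, pvP_ge l _ le_rfl]

lemma pvP_max (l : List Int) (m : Int) : pvP l (max 0 m) = pvP l m := by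
  have h : (max 0 m).toNat = m.toNat := by omega
  unfold pvP
  rw [h]

-- v[t] += c read back: indexes shift by exactly c at t, unchanged elsewhere

lemma pyGetD_bump (v : List Int) (t : Int) (ht0 : 0 ≤ t) (ht : t < (v.length : Int))
    (c : Int) (j : Int) (hj0 : 0 ≤ j) :
    PySem.List.pyGetD (PySem.List.pySetD v t (PySem.List.pyGetD v t 0 + c)) j 0
      = PySem.List.pyGetD v j 0 + (if j = t then c else 0) := by
  have hcast : ((t.toNat : Int)) = t := by omega
  by_cases hj : j < (v.length : Int)
  · have hjcast : ((j.toNat : Int)) = j := by omega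
    rw [← hcast, ← hjcast, PySem.List.pyGetD_pySetD_natCast v t.toNat j.toNat _ 0 (by omega)]
    split_ifs with h1 h2 h2
    · rw [hcast, show j = t by omega]
      rw [hcast]
    · omega
    · omega
    · ring
  · have h1 : PySem.List.pyGet? v j = none := by
      rw [PySem.List.pyGet?_eq_none_iff]
      unfold PySem.Raise.InRange
      omega
    have h2 : PySem.List.pyGet? (PySem.List.pySetD v t (PySem.List.pyGetD v t 0 + c)) j = none := by
      rw [PySem.List.pyGet?_eq_none_iff]
      unfold PySem.Raise.InRange
      rw [PySem.List.length_pySetD]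
      omega
    rw [PySem.List.pyGetD_of_none _ _ _ h1, PySem.List.pyGetD_of_none _ _ _ h2]
    rw [if_neg (by omega)]
    ring

lemma pvInvD_step (l : List Int) (r x : Int) (hr : 0 ≤ r) (i : Nat)
    (hi : i < l.length) (sA : List Int × Int × Int) (sB : List Int × Int)
    (h : pvInvD l r i sA sB) :
    pvInvD l r (i + 1) (pvAstep x (l.length : Int) r sA (i : Int))
      (pvBstep x (2 * r + 1) (pvBases (l.length : Int) r (pvPrefix l)) sB (i : Int)) := by
  obtain ⟨v, s, use⟩ := sA
  obtain ⟨Dl, prev0⟩ := sB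
  obtain ⟨h1, h2, h0, h3, h4, h5, h6⟩ := h
  dsimp only at h1 h2 h0 h3 h4 h5 h6
  simp only [pvAstep, pvBstep, pvInvD]
  -- B's two reads
  have hback : (if 0 ≤ (i:Int) - (2*r+1) then PySem.List.pyGetD Dl ((i:Int) - (2*r+1)) 0 else 0)
      = pvDg Dl ((i:Int) - 2*r - 1) := by
    rw [show (i:Int) - (2*r+1) = (i:Int) - 2*r - 1 by ring]
    unfold pvDg; rfl
  have hbasei : PySem.List.pyGetD (pvBases ((l.length:Int)) r (pvPrefix l)) ((i:Int)) 0
      = pvP l ((i:Int)+r+1) - pvP l ((i:Int)-r) := by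
    rw [pvBases, PySem.List.pyGetD_map_pyRange_of_nonneg _ ((l.length:Int)) ((i:Int)) 0
      (by omega) (by omega)]
    rw [pvPrefix_getD l _ (by omega) (by omega), pvPrefix_getD l _ (by omega) (by omega),
      pvP_min, pvP_max]
  -- A's window sum after the two boundary updates
  have hs1 : (if (i:Int) + r < (l.length:Int) then s + PySem.List.pyGetD v ((i:Int)+r) 0 else s)
      = pvP l ((i:Int)+r+1) - pvP l ((i:Int)-r-1)
        + pvDg Dl ((i:Int) - 1) - pvDg Dl ((i:Int) - 2*r - 2) := by
    split_ifs with hin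
    · have hc : (((i + r.toNat : Nat)) : Int) = (i:Int) + r := by omega
      have h5' := h5 (i + r.toNat) (by omega) (by rw [hc])
      rw [hc] at h5'
      rw [h4, h5', pvP_succ l ((i:Int)+r) (by omega) hin]
      ring
    · rw [h4, pvP_ge l ((i:Int)+r+1) (by omega), pvP_ge l ((i:Int)+r) (by omega)]
  have hs2 : (if 0 < (i:Int) - r then
        (if (i:Int) + r < (l.length:Int) then s + PySem.List.pyGetD v ((i:Int) + r) 0 else s)
          - PySem.List.pyGetD v ((i:Int) - r - 1) 0
      else if (i:Int) + r < (l.length:Int) then s + PySem.List.pyGetD v ((i:Int) + r) 0 else s)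
      = pvP l ((i:Int)+r+1) - pvP l ((i:Int)-r)
        + pvDg Dl ((i:Int) - 1) - pvDg Dl ((i:Int) - 2*r - 1) := by
    rw [hs1]
    split_ifs with hir
    · have hc : (((i - r.toNat - 1 : Nat)) : Int) = (i:Int) - r - 1 := by omega
      have h6' := h6 (i - r.toNat - 1) (by omega) (by rw [hc]; omega) (by rw [hc]; omega)
      rw [hc] at h6'
      rw [show (i:Int) - r - 1 - r = (i:Int) - 2*r - 1 by ring,
          show (i:Int) - 2*r - 1 - 1 = (i:Int) - 2*r - 2 by ring] at h6'
      have hP : pvP l ((i:Int)-r) = pvP l ((i:Int)-r-1) + PySem.List.pyGetD l ((i:Int)-r-1) 0 := by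
        have hx := pvP_succ l ((i:Int)-r-1) (by omega) (by omega)
        rw [show (i:Int) - r - 1 + 1 = (i:Int) - r by ring] at hx
        exact hx
      rw [h6', hP]
      ring
    · rw [pvP_nonpos l ((i:Int)-r) (by omega), pvP_nonpos l ((i:Int)-r-1) (by omega),
        pvDg_neg Dl ((i:Int) - 2*r - 1) (by omega), pvDg_neg Dl ((i:Int) - 2*r - 2) (by omega)]
  have htmin : (if (l.length:Int) - 1 < (i:Int) + r then (l.length:Int) - 1 else (i:Int) + r)
      = min ((l.length:Int) - 1) ((i:Int) + r) := by
    rw [min_def]; split_ifs <;> omega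
  rw [htmin, hs2, hback, hbasei]
  set prev := pvDg Dl ((i:Int) - 1) with hprevdef
  set back := pvDg Dl ((i:Int) - 2*r - 1) with hbackdef
  set base := pvP l ((i:Int)+r+1) - pvP l ((i:Int)-r) with hbasedef
  set t := min ((l.length:Int) - 1) ((i:Int) + r) with htdef
  have ht0 : 0 ≤ t := by omega
  have htlt : t < ((v.length : Nat) : Int) := by omega
  rw [h0]
  -- A's diff equals the increment of B's running maximum
  set diff := (if 0 < x - (base + prev - back) then x - (base + prev - back) else 0) with hdiffdef
  have hprev' : (if prev < x - base + back then x - base + back else prev) = prev + diff := by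
    rw [hdiffdef]; split_ifs <;> omega
  rw [hprev']
  refine ⟨?_, ?_, ?_, ?_, ?_, ?_, ?_⟩
  · rw [PySem.List.length_pySetD]; exact h1
  · simp [h2]
  · rw [show ((i+1:Nat):Int) - 1 = ((Dl.length:Nat):Int) by omega, pvDg_append, if_pos rfl]
  · rw [h3, h0]
  · rw [show ((i+1:Nat):Int) - 1 = ((Dl.length:Nat):Int) by omega, pvDg_append, if_pos rfl,
      pvDg_append, if_neg (by omega),
      show ((i+1:Nat):Int) - 2*r - 2 = (i:Int) - 2*r - 1 by push_cast; ring,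
      show ((i+1:Nat):Int) + r = (i:Int) + r + 1 by push_cast; ring,
      show ((i+1:Nat):Int) - r - 1 = (i:Int) - r by push_cast; ring]
    rw [hbasedef] at *
    ring
  · intro j hj hjr
    push_cast at hjr
    rw [pyGetD_bump v t ht0 htlt _ _ (by positivity), if_neg (by omega), add_zero]
    exact h5 j hj (by omega)
  · intro j hj hjr hjn
    rw [pyGetD_bump v t ht0 htlt _ _ (by positivity)]
    push_cast at hjr hjn
    by_cases hjt : ((j:Nat):Int) = t
    · -- the newly placed cell: t = i + r (t ≤ n - 2 rules out the clamped case)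
      have htir : t = (i:Int) + r := by omega
      rw [if_pos hjt]
      have h5' := h5 j hj (by omega)
      rw [h5', pvDg_append, pvDg_append, h2,
        if_pos (by omega : ((j:Nat):Int) - r = ((i:Nat):Int)),
        if_neg (by omega : ¬ ((j:Nat):Int) - r - 1 = ((i:Nat):Int)),
        show ((j:Nat):Int) - r - 1 = (i:Int) - 1 by omega, ← hprevdef]
      ring
    · rw [if_neg hjt, add_zero]
      have hjlt : ((j:Nat):Int) < (i:Int) + r := by omega
      have h6' := h6 j hj hjlt (by omega)
      rw [h6', pvDg_append, pvDg_append, h2,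
        if_neg (by omega : ¬ ((j:Nat):Int) - r = ((i:Nat):Int)),
        if_neg (by omega : ¬ ((j:Nat):Int) - r - 1 = ((i:Nat):Int))]

lemma pvFoldD (l : List Int) (r x : Int) (hr : 0 ≤ r) :
    ∀ (c i : Nat) (sA : List Int × Int × Int) (sB : List Int × Int), i + c = l.length →
      pvInvD l r i sA sB →
      pvInvD l r l.length
        ((PySem.List.pyRange (i:Int) (l.length:Int) 1).foldl (pvAstep x (l.length:Int) r) sA)
        ((PySem.List.pyRange (i:Int) (l.length:Int) 1).foldl
          (pvBstep x (2 * r + 1) (pvBases (l.length:Int) r (pvPrefix l))) sB) := by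
  intro c
  induction c with
  | zero =>
    intro i sA sB hic hinv
    rw [PySem.List.pyRange_one_eq_nil (by omega)]
    simpa [show i = l.length by omega] using hinv
  | succ c ih =>
    intro i sA sB hic hinv
    rw [PySem.List.pyRange_one_cons (by omega)]
    simp only [List.foldl_cons]
    have hstep := pvInvD_step l r x hr i (by omega) sA sB hinv
    rw [show ((i:Int) + 1) = (((i+1 : Nat)) : Int) by push_cast; ring]
    exact ih (i+1) _ _ (by omega) hstep

lemma pvInvD_init (l : List Int) (r : Int) (hr : 0 ≤ r) :
    pvInvD l r 0 (l, (PySem.List.slice l (some 0) (some r)).sum, 0) ([], 0) := by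
  refine ⟨rfl, rfl, ?_, rfl, ?_, ?_, ?_⟩
  · dsimp only
    rw [pvDg_neg [] _ (by omega)]
  · dsimp only
    rw [PySem.List.slice_zero_start, PySem.List.slice_to _ hr]
    rw [pvP_nonpos l (((0:Nat):Int) - r - 1) (by omega),
      pvDg_neg [] _ (by omega), pvDg_neg [] _ (by omega)]
    rw [show ((0:Nat):Int) + r = r by norm_num]
    unfold pvP
    ring
  · intro j hj hjr
    rfl
  · intro j hj hjr hjn
    dsimp only
    rw [pvDg_nil, pvDg_nil]
    ring

lemma pvUse_eq (stations : List Int) (r x : Int) (hpre : 0 ≤ r ∨ stations = []) :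
    pvAuse stations r x
      = pvBneeded (stations.length : Int) (2 * r + 1)
          (pvBases (stations.length : Int) r (pvPrefix stations)) x := by
  rcases hpre with hr | hnil
  · unfold pvAuse pvBneeded
    have hfin := pvFoldD stations r x hr stations.length 0
      (stations, (PySem.List.slice stations (some 0) (some r)).sum, 0) ([], 0)
      (by omega) (pvInvD_init stations r hr)
    rw [show ((0:Nat):Int) = (0:Int) by norm_num] at hfin
    exact hfin.2.2.2.1
  · subst hnil
    rfl

lemma pvLoop_eq (stations : List Int) (r k : Int) (hpre : 0 ≤ r ∨ stations = []) (lo hi : Int) :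
    pvAloop stations r k lo hi
      = pvBloop (stations.length : Int) (2 * r + 1)
          (pvBases (stations.length : Int) r (pvPrefix stations)) k lo hi := by
  generalize hm : (hi + 1 - lo).toNat = m
  induction m using Nat.strong_induction_on generalizing lo hi with
  | _ m ih =>
    rw [pvAloop, pvBloop]
    split_ifs with h
    · have hb := PySem.Int.floordiv_two_mid_bounds h
      simp only []
      rw [pvUse_eq stations r _ hpre]
      split_ifs with h2
      · exact ih _ (by omega) _ _ rfl
      · exact ih _ (by omega) _ _ rfl
    · rfl

-- ===== VERDICT (by name: the statement is the Claim_ definition above) =====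
theorem maxPower_spec : Claim_equal_maxPower := by
  intro stations r k _ hpre
  unfold Spec_maxPower maxPower maxPower_alt
  have hs : PySem.List.pyGetD (pvPrefix stations) (stations.length : Int) 0 = stations.sum := by
    rw [pvPrefix_getD stations _ (by omega) le_rfl, pvP_ge stations _ le_rfl]
  rw [hs]
  rcases hpre with hr | hnil | ⟨_, hneg⟩
  · exact pvLoop_eq stations r k (Or.inl hr) 0 (k + stations.sum)
  · exact pvLoop_eq stations r k (Or.inr hnil) 0 (k + stations.sum)
  · -- the binary search never runs: both sides return k + sum at once
    rw [pvAloop, pvBloop,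
      dif_neg (by omega : ¬ ((0:Int) ≤ k + stations.sum)),
      dif_neg (by omega : ¬ ((0:Int) ≤ k + stations.sum))]
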